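-- pv_equiv track=rewrite | github.com/caixuhong/cncp | cncp_v2.py | cal_flows_for_each_port
-- ===== SOURCE A (Python) =====
-- def cal_flows_for_each_port(routing_info, nports):
--     """
--     calculate the number of flows that use a port
--     """
--     port_to_flow = dict()
--     for port_id in range(nports):
--         num_flow = 0
--         for _, ports in routing_info.items():
--             if port_id in ports:
--                 num_flow += 1
--         port_to_flow[port_id] = num_flow
--     return port_to_flow
-- ===== SOURCE B (Python) =====
-- def cal_flows_for_each_port(routing_info, nports):
--     """
--     calculate the number of flows that use a port
--     """
--     port_to_flow = {port_id: 0 for port_id in range(nports)}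
--     for ports in routing_info.values():
--         for p in set(ports):
--             if p in port_to_flow:
--                 port_to_flow[p] += 1
--     return port_to_flow
-- ===== Notes on version B (the rewrite author's own statement) =====
-- stated objective: faster
-- what changed: Replaced the per-port scan of all flows (membership test on each flow's port list for every port id) by a single pass over the flows that increments a counter per distinct port of each flow, after initialising all ports to 0.
import Mathlib
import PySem

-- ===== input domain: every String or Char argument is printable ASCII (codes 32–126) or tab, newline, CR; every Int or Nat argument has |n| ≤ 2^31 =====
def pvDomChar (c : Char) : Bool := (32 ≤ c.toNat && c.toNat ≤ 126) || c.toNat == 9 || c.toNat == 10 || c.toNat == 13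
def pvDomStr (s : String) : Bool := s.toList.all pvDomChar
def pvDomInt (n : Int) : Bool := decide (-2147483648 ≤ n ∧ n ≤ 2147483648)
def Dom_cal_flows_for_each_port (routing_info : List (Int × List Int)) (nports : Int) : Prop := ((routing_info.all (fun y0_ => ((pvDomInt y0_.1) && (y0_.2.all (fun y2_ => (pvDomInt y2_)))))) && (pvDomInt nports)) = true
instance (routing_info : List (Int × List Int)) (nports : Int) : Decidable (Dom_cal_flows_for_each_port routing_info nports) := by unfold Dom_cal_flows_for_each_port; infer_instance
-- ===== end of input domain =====

-- B replaces A's per-port scan of all flows by a single pass over the flows that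
-- increments a counter per distinct port of each flow (objective: faster).

-- ===== PORT A =====
def cal_flows_for_each_port (routing_info : List (Int × List Int)) (nports : Int) : List (Int × Int) :=
  let d := PySem.Dict.ofList routing_info
  ((PySem.List.pyRange 0 nports).foldl (fun acc port_id =>
      acc.insert port_id
        (d.items.foldl (fun num kv => if port_id ∈ kv.2 then num + 1 else num) (0 : Int)))
    PySem.Dict.empty).items

-- ===== PORT B =====
def cal_flows_for_each_port_alt (routing_info : List (Int × List Int)) (nports : Int) : List (Int × Int) :=
  let init := (PySem.List.pyRange 0 nports).foldl (fun d port_id => d.insert port_id (0 : Int)) PySem.Dict.empty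
  (((PySem.Dict.ofList routing_info).values).foldl (fun d ports =>
      (PySem.Set.ofList ports).foldl (fun d p => if d.contains p then d.modify p 0 (· + 1) else d) d)
    init).items

-- ===== PRECONDITION & SPEC =====
def Spec_cal_flows_for_each_port (routing_info : List (Int × List Int)) (nports : Int) (out : List (Int × Int)) : Prop := out = cal_flows_for_each_port_alt routing_info nports
instance (routing_info : List (Int × List Int)) (nports : Int) (out : List (Int × Int)) : Decidable (Spec_cal_flows_for_each_port routing_info nports out) := by unfold Spec_cal_flows_for_each_port; infer_instance

-- ===== CLAIM (what is proved, stated in full; the proofs are below) =====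
def Claim_equal_cal_flows_for_each_port : Prop := ∀ (routing_info : List (Int × List Int)) (nports : Int), Dom_cal_flows_for_each_port routing_info nports → Spec_cal_flows_for_each_port routing_info nports (cal_flows_for_each_port routing_info nports)

-- ===== LEMMAS AND PROOFS =====

-- One flow: incrementing (guarded by key presence) over a duplicate-free port list s
-- adds [i ∈ s] to each counter of a dict whose items are R.map (fun i => (i, c i)).
theorem pv_inner (R : List Int) (hR : R.Nodup) (s : List Int) (hs : s.Nodup)
    (c : Int → Int) (d : PySem.Dict Int Int) (hd : d.items = R.map (fun i => (i, c i))) :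
    (s.foldl (fun d p => if d.contains p then d.modify p 0 (· + 1) else d) d).items
      = R.map (fun i => (i, c i + if i ∈ s then 1 else 0)) := by
  induction s generalizing c d with
  | nil => simpa using hd
  | cons p s ih =>
    have hkeys : d.keys = R := by
      show d.items.map Prod.fst = R
      rw [hd, List.map_map]
      exact List.map_id R
    have hps : p ∉ s := (List.nodup_cons.mp hs).1
    have hsn : s.Nodup := (List.nodup_cons.mp hs).2
    have hcont : d.contains p = decide (p ∈ R) := by
      rw [PySem.Dict.contains_eq_decide_mem_keys, hkeys]
    by_cases hpR : p ∈ R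
    · have hc : d.contains p = true := by simp [hcont, hpR]
      have hget : d.getD p 0 = c p := by
        apply PySem.Dict.getD_of_mem_items
        · rw [hd]; exact List.mem_map.mpr ⟨p, hpR, rfl⟩
        · rw [hkeys]; exact hR
      have hitems : (d.modify p 0 (· + 1)).items
          = R.map (fun i => (i, if i = p then c p + 1 else c i)) := by
        show (d.insert p (d.getD p 0 + 1)).items = _
        rw [PySem.Dict.items_insert_of_contains _ _ hc, hd, List.map_map]
        refine List.map_congr_left (fun i _ => ?_)
        by_cases h : i = p <;> simp [h, hget]
      rw [List.foldl_cons, if_pos hc,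
        ih hsn (fun i => if i = p then c p + 1 else c i) _ hitems]
      refine List.map_congr_left (fun i _ => ?_)
      by_cases h : i = p
      · subst h; simp [hps]
      · simp [h]
    · have hc : d.contains p = false := by simp [hcont, hpR]
      rw [List.foldl_cons, if_neg (by simp [hc]), ih hsn c d hd]
      refine List.map_congr_left (fun i hi => ?_)
      have hip : i ≠ p := fun h => hpR (h ▸ hi)
      simp [List.mem_cons, hip]

-- The whole pass: folding B's body over the flow list F adds the number of flows
-- containing i to each counter.
theorem pv_outer (R : List Int) (hR : R.Nodup) (F : List (List Int))
    (c : Int → Int) (d : PySem.Dict Int Int) (hd : d.items = R.map (fun i => (i, c i))) :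
    (F.foldl (fun d ports =>
        (PySem.Set.ofList ports).foldl (fun d p => if d.contains p then d.modify p 0 (· + 1) else d) d)
      d).items
      = R.map (fun i => (i, c i + (F.countP (fun ports => decide (i ∈ ports)) : Int))) := by
  induction F generalizing c d with
  | nil => simpa using hd
  | cons ports F ih =>
    have h1 := pv_inner R hR (PySem.Set.ofList ports) (PySem.Set.nodup_ofList ports)
      c d hd
    have h1' : ((PySem.Set.ofList ports).foldl
        (fun d p => if d.contains p then d.modify p 0 (· + 1) else d) d).items
        = R.map (fun i => (i, c i + if i ∈ ports then 1 else 0)) := by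
      rw [h1]
      exact List.map_congr_left (fun i _ => by simp [PySem.Set.mem_ofList])
    rw [List.foldl_cons, ih (fun i => c i + if i ∈ ports then 1 else 0) _ h1']
    refine List.map_congr_left (fun i _ => ?_)
    simp only [Prod.mk.injEq, true_and, List.countP_cons]
    by_cases h : i ∈ ports
    · simp [h]; ring
    · simp [h]

theorem pv_init (nports : Int) :
    ((PySem.List.pyRange 0 nports).foldl (fun d port_id => d.insert port_id (0 : Int)) PySem.Dict.empty).items
      = (PySem.List.pyRange 0 nports).map (fun i => (i, (0 : Int))) := by
  rw [PySem.Dict.items_foldl_insert_fresh (PySem.List.pyRange 0 nports) (fun i => i)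
      (fun _ => (0 : Int)) PySem.Dict.empty (fun a _ => by simp)
      (by simpa using PySem.List.nodup_pyRange_one 0 nports)]
  simp [PySem.Dict.empty]

-- ===== VERDICT (by name: the statement is the Claim_ definition above) =====
theorem cal_flows_for_each_port_spec : Claim_equal_cal_flows_for_each_port := by
  intro routing_info nports _
  show cal_flows_for_each_port routing_info nports = cal_flows_for_each_port_alt routing_info nports
  unfold cal_flows_for_each_port cal_flows_for_each_port_alt
  set d := PySem.Dict.ofList routing_info with hdd
  have hA : ∀ pid : Int,
      d.items.foldl (fun num kv => if pid ∈ kv.2 then num + 1 else num) (0 : Int)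
        = (d.items.countP (fun kv => decide (pid ∈ kv.2)) : Int) := by
    intro pid
    simpa using PySem.List.foldl_ite_add_one (fun kv => pid ∈ kv.2) d.items 0
  rw [PySem.Dict.items_foldl_insert_fresh (PySem.List.pyRange 0 nports) (fun i => i)
      (fun pid => d.items.foldl (fun num kv => if pid ∈ kv.2 then num + 1 else num) (0 : Int))
      PySem.Dict.empty (fun a _ => by simp)
      (by simpa using PySem.List.nodup_pyRange_one 0 nports),
    pv_outer (PySem.List.pyRange 0 nports) (PySem.List.nodup_pyRange_one 0 nports)
      d.values (fun _ => (0 : Int)) _ (pv_init nports)]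
  simp only [PySem.Dict.empty, List.nil_append]
  refine List.map_congr_left (fun i _ => ?_)
  have : d.values.countP (fun ports => decide (i ∈ ports))
      = d.items.countP (fun kv => decide (i ∈ kv.2)) := by
    show (d.items.map Prod.snd).countP _ = _
    rw [List.countP_map]
    rfl
  simp [hA, this]
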